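-- pv_equiv track=rewrite | github.com/orx57/swl-web-sdr | streamlit_app.py | deduplicate_devices
-- ===== SOURCE A (Python) =====
-- def deduplicate_devices(devices):
--     """Remove duplicate devices based on URL"""
--     unique_devices = {}
--     for device in devices:
--         url = device.get("url")
--         if url:
--             # Keep only the first occurrence or update if better status
--             if url not in unique_devices or (
--                 device.get("status") == "active"
--                 and unique_devices[url].get("status") != "active"
--             ):
--                 unique_devices[url] = device
--     return list(unique_devices.values())
-- ===== SOURCE B (Python) =====
-- def deduplicate_devices(devices):
--     """Remove duplicate devices based on URL"""
--     groups = {}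
--     for device in devices:
--         url = device.get("url")
--         if url:
--             groups.setdefault(url, []).append(device)
--     result = []
--     for url, group in groups.items():
--         active = next((d for d in group if d.get("status") == "active"), None)
--         result.append(active if active is not None else group[0])
--     return result
-- ===== Notes on version B (the rewrite author's own statement) =====
-- stated objective: alternative
-- what changed: A keeps a single running-best device per url in one accumulator dict (overwriting when an active device displaces an inactive one); B first groups all devices per url into lists in one pass, then in a second pass selects from each group the first active device, or the first device if none is active.
import Mathlib
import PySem

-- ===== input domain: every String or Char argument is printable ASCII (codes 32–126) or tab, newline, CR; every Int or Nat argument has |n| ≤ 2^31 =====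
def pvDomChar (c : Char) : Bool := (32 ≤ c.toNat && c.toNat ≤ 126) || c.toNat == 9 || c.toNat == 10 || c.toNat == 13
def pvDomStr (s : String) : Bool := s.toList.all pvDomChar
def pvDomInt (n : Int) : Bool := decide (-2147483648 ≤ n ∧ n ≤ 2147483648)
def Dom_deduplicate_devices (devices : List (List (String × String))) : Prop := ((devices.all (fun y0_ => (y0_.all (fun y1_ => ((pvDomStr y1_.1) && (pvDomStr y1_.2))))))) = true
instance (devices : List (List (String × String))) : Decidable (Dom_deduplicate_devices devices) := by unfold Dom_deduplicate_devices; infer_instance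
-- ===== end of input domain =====

-- B replaces A's running-best accumulator with a build-then-select decomposition:
-- one pass grouping all devices per url, then a pass selecting first-active-else-first
-- from each group (objective: alternative; same asymptotic cost).

-- device.get(k) on a device dict (assoc list, first match)
def pvGet (device : List (String × String)) (k : String) : Option String :=
  (PySem.Dict.mk device).get? k

-- ===== PORT A =====
-- loop body of A: running dict url -> best device so far
def pvStepA (d : PySem.Dict String (List (String × String)))
    (device : List (String × String)) : PySem.Dict String (List (String × String)) :=
  match pvGet device "url" with
  | none => d
  | some url =>
    if url = "" then d
    else if (!(d.contains url)) ||
            ((pvGet device "status" == some "active") &&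
             !((pvGet (d.getD url []) "status") == some "active")) then
      d.insert url device
    else d

def deduplicate_devices (devices : List (List (String × String))) : List (List (String × String)) :=
  (devices.foldl pvStepA PySem.Dict.empty).values

-- ===== PORT B =====
def pvIsActive (device : List (String × String)) : Bool :=
  pvGet device "status" == some "active"

-- grouping pass: url -> list of all devices with that url (setdefault/append = modify)
def pvStepB (g : PySem.Dict String (List (List (String × String))))
    (device : List (String × String)) : PySem.Dict String (List (List (String × String))) :=
  match pvGet device "url" with
  | none => g
  | some url =>
    if url = "" then g
    else g.modify url [] (· ++ [device])

-- selection pass body: first active device in the group, else the first device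
def pvSelect (group : List (List (String × String))) : List (String × String) :=
  match group.find? pvIsActive with
  | some d => d
  | none => group.headD []

def deduplicate_devices_alt (devices : List (List (String × String))) : List (List (String × String)) :=
  ((devices.foldl pvStepB PySem.Dict.empty).items).foldl (fun res p => res ++ [pvSelect p.2]) []

-- ===== PRECONDITION & SPEC =====
def Spec_deduplicate_devices (devices : List (List (String × String))) (out : List (List (String × String))) : Prop := out = deduplicate_devices_alt devices
instance (devices : List (List (String × String))) (out : List (List (String × String))) : Decidable (Spec_deduplicate_devices devices out) := by unfold Spec_deduplicate_devices; infer_instance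

-- ===== CLAIM (what is proved, stated in full; the proofs are below) =====
def Claim_equal_deduplicate_devices : Prop := ∀ (devices : List (List (String × String))), Dom_deduplicate_devices devices → Spec_deduplicate_devices devices (deduplicate_devices devices)

-- ===== LEMMAS AND PROOFS =====

-- abstraction: a group abstracts to its selected representative
def pvF (p : String × List (List (String × String))) : String × List (String × String) :=
  (p.1, pvSelect p.2)

lemma pvSelect_singleton (x : List (String × String)) : pvSelect [x] = x := by
  cases h : pvIsActive x <;> simp [pvSelect, List.find?, h]

lemma pvKeys_mk_map (gr : PySem.Dict String (List (List (String × String)))) :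
    (PySem.Dict.mk (gr.items.map pvF)).keys = gr.keys := by
  show (gr.items.map pvF).map Prod.fst = gr.items.map Prod.fst
  simp [List.map_map]
  intro a b _; rfl

lemma pvSelect_mem_of_ne (lst : List (List (String × String))) (h : lst ≠ []) :
    pvSelect lst ∈ lst := by
  unfold pvSelect
  cases hf : lst.find? pvIsActive with
  | some x => exact List.mem_of_find?_eq_some hf
  | none => cases lst with
    | nil => exact absurd rfl h
    | cons a t => exact List.mem_cons_self

lemma pvSelect_append_active (lst : List (List (String × String))) (dev : List (String × String))
    (_h : lst ≠ []) (hsel : pvIsActive (pvSelect lst) = false) (hdev : pvIsActive dev = true) :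
    pvSelect (lst ++ [dev]) = dev := by
  have hf : lst.find? pvIsActive = none := by
    cases hf : lst.find? pvIsActive with
    | none => rfl
    | some x =>
      have hx : pvIsActive x = true := List.find?_some hf
      have : pvSelect lst = x := by unfold pvSelect; rw [hf]
      rw [this, hx] at hsel; exact absurd hsel (by simp)
  unfold pvSelect
  rw [List.find?_append, hf]
  simp [List.find?, hdev]

lemma pvSelect_append_stable (lst : List (List (String × String))) (dev : List (String × String))
    (h : lst ≠ []) (hc : pvIsActive dev = false ∨ pvIsActive (pvSelect lst) = true) :
    pvSelect (lst ++ [dev]) = pvSelect lst := by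
  cases hf : lst.find? pvIsActive with
  | some x =>
    unfold pvSelect
    rw [List.find?_append, hf]
    simp
  | none =>
    have hall : ∀ x ∈ lst, ¬ pvIsActive x = true := List.find?_eq_none.mp hf
    have hsel : pvIsActive (pvSelect lst) = false := by
      have := hall _ (pvSelect_mem_of_ne lst h)
      simpa using this
    have hdev : pvIsActive dev = false := by
      rcases hc with h1 | h1
      · exact h1
      · rw [hsel] at h1; exact absurd h1 (by simp)
    unfold pvSelect
    rw [List.find?_append, hf]
    simp only [Option.none_or, List.find?, hdev]
    cases lst with
    | nil => exact absurd rfl h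
    | cons a t => rfl

lemma pvVal_unique (gr : PySem.Dict String (List (List (String × String))))
    (hnd : gr.keys.Nodup) {k : String} {a b : List (List (String × String))}
    (h1 : (k, a) ∈ gr.items) (h2 : (k, b) ∈ gr.items) : a = b := by
  have e1 := PySem.Dict.get?_of_mem_items gr h1 hnd
  have e2 := PySem.Dict.get?_of_mem_items gr h2 hnd
  rw [e1] at e2; exact Option.some_inj.mp e2

lemma pvStep_comm (gr : PySem.Dict String (List (List (String × String))))
    (hnd : gr.keys.Nodup) (hne : ∀ p ∈ gr.items, p.2 ≠ [])
    (device : List (String × String)) :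
    pvStepA (PySem.Dict.mk (gr.items.map pvF)) device
      = PySem.Dict.mk ((pvStepB gr device).items.map pvF) := by
  set d := PySem.Dict.mk (gr.items.map pvF) with hd
  have hkeys : d.keys = gr.keys := pvKeys_mk_map gr
  have hdnd : d.keys.Nodup := hkeys ▸ hnd
  unfold pvStepA pvStepB
  cases hu : pvGet device "url" with
  | none => rfl
  | some url =>
    by_cases hE : url = ""
    · simp only [if_pos hE]; exact hd
    · simp only [if_neg hE]
      have hcont : d.contains url = gr.contains url := by
        rw [PySem.Dict.contains_eq_decide_mem_keys, PySem.Dict.contains_eq_decide_mem_keys, hkeys]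
      cases hc : gr.contains url with
      | false =>
        have hdc : d.contains url = false := hcont.trans hc
        rw [hdc]
        simp only [Bool.not_false, Bool.true_or, if_true]
        apply PySem.Dict.ext
        rw [PySem.Dict.items_insert_of_not_contains d device hdc]
        show gr.items.map pvF ++ [(url, device)]
          = ((gr.modify url [] (· ++ [device])).items.map pvF)
        rw [PySem.Dict.modify, PySem.Dict.getD_of_not_contains gr [] hc]
        rw [PySem.Dict.items_insert_of_not_contains gr _ hc]
        rw [List.map_append]
        simp [pvF, pvSelect_singleton]
      | true =>
        have hdc : d.contains url = true := hcont.trans hc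
        -- the existing group at url
        have hmemk : url ∈ gr.keys := (PySem.Dict.contains_iff_mem_keys gr url).mp hc
        have hex : ∃ lst, (url, lst) ∈ gr.items := by
          have : url ∈ gr.items.map Prod.fst := hmemk
          obtain ⟨p, hp, hpe⟩ := List.mem_map.mp this
          exact ⟨p.2, by rw [← hpe]; exact hp⟩
        obtain ⟨lst, hmem⟩ := hex
        have hlne : lst ≠ [] := hne _ hmem
        have hgetgr : gr.getD url [] = lst := PySem.Dict.getD_of_mem_items gr hmem hnd []
        have hmemd : (url, pvSelect lst) ∈ d.items := by
          exact List.mem_map.mpr ⟨(url, lst), hmem, rfl⟩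
        have hgetd : d.getD url [] = pvSelect lst := PySem.Dict.getD_of_mem_items d hmemd hdnd []
        rw [hdc, hgetd]
        rw [PySem.Dict.modify, hgetgr]
        simp only [Bool.not_true, Bool.false_or]
        have hitems : (gr.insert url (lst ++ [device])).items
            = gr.items.map (fun p => if p.1 == url then (url, lst ++ [device]) else p) :=
          PySem.Dict.items_insert_of_contains gr _ hc
        cases hcond : ((pvGet device "status" == some "active") && !(pvGet (pvSelect lst) "status" == some "active")) with
        | true =>
          have hdev : pvIsActive device = true := by
            have := (Bool.and_eq_true _ _).mp hcond
            exact this.1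
          have hsel : pvIsActive (pvSelect lst) = false := by
            have := (Bool.and_eq_true _ _).mp hcond
            simpa [pvIsActive] using this.2
          rw [if_pos rfl]
          apply PySem.Dict.ext
          rw [PySem.Dict.items_insert_of_contains d device hdc, hitems, hd]
          show (gr.items.map pvF).map (fun p => if p.1 == url then (url, device) else p)
            = (gr.items.map (fun p => if p.1 == url then (url, lst ++ [device]) else p)).map pvF
          rw [List.map_map, List.map_map]
          apply List.map_congr_left
          rintro ⟨k, v⟩ hp
          by_cases hpk : k = url
          · subst hpk
            have hp2 : v = lst := pvVal_unique gr hnd hp hmem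
            subst hp2
            simp [pvF, pvSelect_append_active v device hlne hsel hdev]
          · simp [pvF, hpk]
        | false =>
          rw [if_neg (by simp)]
          apply PySem.Dict.ext
          rw [hitems, hd]
          show gr.items.map pvF
            = (gr.items.map (fun p => if p.1 == url then (url, lst ++ [device]) else p)).map pvF
          rw [List.map_map]
          apply List.map_congr_left
          rintro ⟨k, v⟩ hp
          by_cases hpk : k = url
          · subst hpk
            have hp2 : v = lst := pvVal_unique gr hnd hp hmem
            subst hp2
            have hor : pvIsActive device = false ∨ pvIsActive (pvSelect v) = true := by
              rcases Bool.and_eq_false_iff.mp hcond with h1 | h1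
              · left; simpa [pvIsActive] using h1
              · right; simpa [pvIsActive] using h1
            simp [pvF, pvSelect_append_stable v device hlne hor]
          · simp [pvF, hpk]

lemma pvStepB_nodup (gr : PySem.Dict String (List (List (String × String))))
    (hnd : gr.keys.Nodup) (device : List (String × String)) :
    (pvStepB gr device).keys.Nodup := by
  unfold pvStepB
  cases pvGet device "url" with
  | none => exact hnd
  | some url =>
    by_cases h : url = "" <;> simp [h]
    · exact hnd
    · exact PySem.Dict.nodup_keys_insert _ _ _ hnd

lemma pvStepB_ne (gr : PySem.Dict String (List (List (String × String))))
    (hne : ∀ p ∈ gr.items, p.2 ≠ []) (device : List (String × String)) :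
    ∀ p ∈ (pvStepB gr device).items, p.2 ≠ [] := by
  unfold pvStepB
  cases pvGet device "url" with
  | none => exact hne
  | some url =>
    by_cases h : url = ""
    · simpa [h] using hne
    · simp only [if_neg h, PySem.Dict.modify]
      intro p hp
      rcases (PySem.Dict.mem_items_insert gr _ _ _).mp hp with h1 | h1
      · rw [h1]; simp
      · exact hne p h1.1

lemma pvFold_comm (l : List (List (String × String)))
    (gr : PySem.Dict String (List (List (String × String))))
    (hnd : gr.keys.Nodup) (hne : ∀ p ∈ gr.items, p.2 ≠ []) :
    l.foldl pvStepA (PySem.Dict.mk (gr.items.map pvF))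
      = PySem.Dict.mk ((l.foldl pvStepB gr).items.map pvF) := by
  induction l generalizing gr with
  | nil => rfl
  | cons d t ih =>
    simp only [List.foldl_cons]
    rw [pvStep_comm gr hnd hne d]
    exact ih _ (pvStepB_nodup gr hnd d) (pvStepB_ne gr hne d)

-- ===== VERDICT (by name: the statement is the Claim_ definition above) =====
theorem deduplicate_devices_spec : Claim_equal_deduplicate_devices := by
  intro devices _
  show _ = _
  unfold deduplicate_devices deduplicate_devices_alt
  have h := pvFold_comm devices PySem.Dict.empty (by simp [PySem.Dict.keys, PySem.Dict.empty]) (by simp [PySem.Dict.empty])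
  have he : PySem.Dict.mk ((PySem.Dict.empty : PySem.Dict String (List (List (String × String)))).items.map pvF) = PySem.Dict.empty := rfl
  rw [he] at h
  rw [h]
  rw [PySem.List.foldl_append_singleton_eq_map]
  show ((devices.foldl pvStepB PySem.Dict.empty).items.map pvF).map Prod.snd = _
  simp [List.map_map]
  intro a b _; rfl
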